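-- pv_equiv track=rewrite | github.com/WooilKim/algorithm-practice | leetcode/667.BeautifulArrangementII.py | constructArray
-- ===== SOURCE A (Python) =====
-- from typing import List
--
-- def constructArray(n: int, k: int) -> List[int]:
--     ans = list(range(1, n + 1))
--     i = 0
--     k -= 1
--     while k >= 2:
--         ans = ans[:2 * i + 1] + [ans[-1]] + ans[2 * i + 1:-1]
--         k -= 2
--         i += 1
--     if k == 1:
--         ans[-2], ans[-1] = ans[-1], ans[-2]
--     return ans
-- ===== SOURCE B (Python) =====
-- def constructArray(n: int, k: int) -> list:
--     t = max(0, (k - 1) // 2)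
--     res = []
--     for j in range(t):
--         res.append(j + 1)
--         res.append(n - j)
--     res.extend(range(t + 1, n - t + 1))
--     if k >= 2 and k % 2 == 0:
--         res[-2], res[-1] = res[-1], res[-2]
--     return res
-- ===== Notes on version B (the rewrite author's own statement) =====
-- stated objective: faster
-- what changed: Replaces the loop that rebuilds the whole list by slicing and reinserting the last element k/2 times with a single pass that emits the interleaved low/high prefix and the ascending tail directly from the closed-form pair count t = max(0,(k-1)//2).
-- outside the precondition, e.g. on constructArray(2, 5): A returns [1, 2, 2], B returns [1, 2, 2, 1]; on constructArray(3, 7): A returns [1, 3, 2, 2, 2], B returns [1, 3, 2, 2, 3, 1]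
import Mathlib
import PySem

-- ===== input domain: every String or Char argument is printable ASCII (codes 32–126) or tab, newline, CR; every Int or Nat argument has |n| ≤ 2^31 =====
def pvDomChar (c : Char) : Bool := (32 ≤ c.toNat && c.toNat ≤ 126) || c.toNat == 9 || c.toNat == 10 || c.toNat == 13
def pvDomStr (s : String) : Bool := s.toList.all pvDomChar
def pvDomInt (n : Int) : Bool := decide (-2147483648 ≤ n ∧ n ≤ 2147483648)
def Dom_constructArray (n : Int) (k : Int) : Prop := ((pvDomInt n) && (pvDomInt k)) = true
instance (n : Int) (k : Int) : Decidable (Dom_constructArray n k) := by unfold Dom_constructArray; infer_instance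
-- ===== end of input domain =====

-- B replaces A's repeated slice-and-reinsert loop by directly emitting the interleaved
-- low/high prefix and the ascending tail in a single pass (objective: faster).

-- ===== PORT A =====
-- Both Pythons contain the identical statement `res[-2], res[-1] = res[-1], res[-2]`;
-- it is ported once.  RHS tuple is read first, then the two index assignments.
def pySwapLast2 (ans : List Int) : List Int :=
  match PySem.List.pyGet? ans (-1), PySem.List.pyGet? ans (-2) with
  | some a1, some a2 => PySem.List.pySetD (PySem.List.pySetD ans (-2) a1) (-1) a2
  | _, _ => ans  -- Python raises IndexError here (fewer than 2 elements); outside Pre_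

-- the `while k >= 2` loop of A, state (ans, i, k); returns final (ans, k)
def constructArrayLoop (ans : List Int) (i : Int) (k : Int) : List Int × Int :=
  if 2 ≤ k then
    match PySem.List.pyGet? ans (-1) with
    | some last =>
        constructArrayLoop
          (PySem.List.slice ans none (some (2*i+1)) ++ [last] ++
            PySem.List.slice ans (some (2*i+1)) (some (-1)))
          (i+1) (k-2)
    | none => (ans, k)  -- Python raises IndexError on ans[-1] (n = 0); outside Pre_
  else (ans, k)
termination_by k.toNat
decreasing_by omega

def constructArray (n : Int) (k : Int) : List Int :=
  let r := constructArrayLoop (PySem.List.pyRange 1 (n+1) 1) 0 (k - 1)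
  if r.2 = 1 then pySwapLast2 r.1 else r.1

-- ===== PORT B =====
def constructArray_alt (n : Int) (k : Int) : List Int :=
  let t := max 0 (PySem.Int.floordiv (k - 1) 2)
  let res := (PySem.List.pyRange 0 t 1).foldl (fun r j => (r ++ [j + 1]) ++ [n - j]) []
  let res := res ++ PySem.List.pyRange (t + 1) (n - t + 1) 1
  if 2 ≤ k ∧ PySem.Int.mod k 2 = 0 then pySwapLast2 res else res

-- ===== PRECONDITION & SPEC =====
-- Pre_ excludes k > n: no arrangement of 1..n has more than n-1 distinct adjacent
-- differences, so such k is outside the problem's domain; there A's out-of-range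
-- slicing/negative indexing yields accidental non-permutations with duplicated
-- entries (or raises IndexError when n <= 1), and B's values there are equally accidental.
def Pre_constructArray (n : Int) (k : Int) : Prop := k ≤ n
instance (n : Int) (k : Int) : Decidable (Pre_constructArray n k) := by unfold Pre_constructArray; infer_instance
def pvWitness_constructArray : Int × Int := (7, 5)

def Spec_constructArray (n : Int) (k : Int) (out : List Int) : Prop := out = constructArray_alt n k
instance (n : Int) (k : Int) (out : List Int) : Decidable (Spec_constructArray n k out) := by unfold Spec_constructArray; infer_instance

-- ===== CLAIM (what is proved, stated in full; the proofs are below) =====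
def Claim_equal_constructArray : Prop := ∀ (n : Int) (k : Int), Dom_constructArray n k → Pre_constructArray n k → Spec_constructArray n k (constructArray n k)

-- ===== LEMMAS AND PROOFS =====

-- the interleaved prefix [1, n, 2, n-1, ...] after t insertions
def pvPref (n : Int) (t : Nat) : List Int :=
  (List.range t).flatMap (fun (j : Nat) => [(j:Int) + 1, n - (j:Int)])

-- loop invariant state: prefix of t pairs, then the ascending tail t+1 .. n-t
def pvState (n : Int) (t : Nat) : List Int :=
  pvPref n t ++ PySem.List.pyRange ((t:Int)+1) (n-(t:Int)+1) 1

theorem pvPref_succ (n : Int) (t : Nat) :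
    pvPref n (t+1) = pvPref n t ++ [(t:Int) + 1, n - (t:Int)] := by
  simp [pvPref, List.range_succ]

theorem pvPref_length (n : Int) (t : Nat) : (pvPref n t).length = 2*t := by
  induction t with
  | zero => simp [pvPref]
  | succ t ih => rw [pvPref_succ]; simp [ih]; omega

theorem pvSlice_neg_one (xs : List Int) (a : Nat) :
    PySem.List.slice xs (some (a:Int)) (some (-1)) = (xs.drop a).take (xs.length - 1 - a) := by
  simp [PySem.List.slice]
  by_cases h : a ≤ xs.length
  · rw [min_eq_left h]
  · have h' : xs.length ≤ a := by omega
    rw [min_eq_right h']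
    simp [List.drop_eq_nil_of_le h']

theorem pvLoop (m : Nat) : ∀ (k : Int), k.toNat = m → ∀ (t : Nat) (n : Int),
    2*(t:Int) + k ≤ n →
    constructArrayLoop (pvState n t) (t:Int) k =
      (pvState n (t + k.toNat / 2), if 2 ≤ k then k % 2 else k) := by
  induction m using Nat.strong_induction_on with
  | _ m ih =>
    intro k hm t n hb
    rw [constructArrayLoop]
    by_cases h2 : 2 ≤ k
    · -- one iteration of the while loop
      have hsplit : PySem.List.pyRange ((t:Int)+1) (n-(t:Int)+1) 1 =
          ((t:Int)+1) :: (PySem.List.pyRange ((t:Int)+2) (n-(t:Int)) 1 ++ [n-(t:Int)]) := by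
        rw [show (n-(t:Int)+1) = (n-(t:Int)) + 1 by ring,
            PySem.List.pyRange_one_succ_right (by omega),
            PySem.List.pyRange_one_cons (by omega)]
        simp [show (t:Int)+1+1 = (t:Int)+2 by ring]
      have hlast : PySem.List.pyGet? (pvState n t) (-1) = some (n - (t:Int)) := by
        rw [PySem.List.pyGet?_neg_one, pvState, hsplit]
        rw [show pvPref n t ++ (((t:Int)+1) :: (PySem.List.pyRange ((t:Int)+2) (n-(t:Int)) 1 ++ [n-(t:Int)]))
            = (pvPref n t ++ (((t:Int)+1) :: PySem.List.pyRange ((t:Int)+2) (n-(t:Int)) 1)) ++ [n-(t:Int)] by simp]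
        exact List.getLast?_concat
      have hlenstate : (pvState n t).length = 2*t + (n - 2*(t:Int)).toNat := by
        simp [pvState, pvPref_length, PySem.List.length_pyRange_one]
        omega
      have hcast : 2*(t:Int)+1 = ((2*t+1 : Nat) : Int) := by push_cast; ring
      have htake : PySem.List.slice (pvState n t) none (some (2*(t:Int)+1)) =
          pvPref n t ++ [(t:Int)+1] := by
        rw [hcast, PySem.List.slice_to_natCast, pvState, hsplit, List.take_append]
        rw [List.take_of_length_le (by rw [pvPref_length]; omega), pvPref_length]
        simp
      have hdrop : PySem.List.slice (pvState n t) (some (2*(t:Int)+1)) (some (-1)) =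
          PySem.List.pyRange ((t:Int)+2) (n-(t:Int)) 1 := by
        rw [hcast, pvSlice_neg_one]
        have hd1 : (pvState n t).drop (2*t+1) =
            PySem.List.pyRange ((t:Int)+2) (n-(t:Int)) 1 ++ [n-(t:Int)] := by
          rw [pvState, hsplit, List.drop_append]
          rw [List.drop_eq_nil_of_le (by rw [pvPref_length]; omega), pvPref_length]
          simp only [show 2*t+1 - 2*t = 1 by omega, List.drop_one, List.tail_cons, List.nil_append]
        rw [hd1, hlenstate]
        rw [List.take_left' (by rw [PySem.List.length_pyRange_one]; omega)]
      rw [if_pos h2, hlast]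
      dsimp only
      rw [htake, hdrop]
      have hnewstate : pvPref n t ++ [(t:Int)+1] ++ [n - (t:Int)] ++ PySem.List.pyRange ((t:Int)+2) (n-(t:Int)) 1
          = pvState n (t+1) := by
        rw [pvState, pvPref_succ]
        simp [show ((t+1:Nat):Int) = (t:Int)+1 by push_cast; ring,
              show n - ((t:Int)+1) + 1 = n - (t:Int) by ring,
              show (t:Int)+1+1 = (t:Int)+2 by ring]
      rw [hnewstate, show (t:Int)+1 = ((t+1 : Nat) : Int) by push_cast; ring]
      rw [ih (k-2).toNat (by omega) (k-2) rfl (t+1) n (by push_cast; omega)]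
      rw [show t+1+((k-2).toNat/2) = t + k.toNat/2 by omega]
      congr 1
      split_ifs with h <;> omega
    · rw [if_neg h2, show t + k.toNat / 2 = t by omega, if_neg h2]

theorem constructArray_spec_aux (n k : Int) (hpre : k ≤ n) :
    constructArray n k = constructArray_alt n k := by
  simp only [constructArray, constructArray_alt]
  have hA0 : PySem.List.pyRange 1 (n+1) 1 = pvState n 0 := by
    simp [pvState, pvPref]
  have hL := pvLoop (k-1).toNat (k-1) rfl 0 n (by push_cast; omega)
  simp only [Nat.cast_zero, zero_add] at hL
  rw [hA0, hL]
  dsimp only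
  have hfd : PySem.Int.floordiv (k-1) 2 = (k-1) / 2 :=
    PySem.Int.floordiv_eq_ediv_of_pos (by norm_num)
  have hmod : PySem.Int.mod k 2 = k % 2 :=
    PySem.Int.mod_eq_emod_of_pos (by norm_num)
  have hT : ((((k-1).toNat / 2 : Nat)) : Int) = max 0 ((k-1) / 2) := by omega
  have hBfold : (PySem.List.pyRange 0 (max 0 ((k-1)/2)) 1).foldl
        (fun r j => (r ++ [j + 1]) ++ [n - j]) [] = pvPref n ((k-1).toNat / 2) := by
    simp only [List.append_assoc]
    rw [PySem.List.foldl_append_eq_flatMap (g := fun j => [j + 1] ++ [n - j])]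
    rw [PySem.List.pyRange_one,
        show (max 0 ((k-1)/2) - 0).toNat = (k-1).toNat / 2 by omega,
        List.flatMap_map]
    unfold pvPref
    simp only [List.nil_append, zero_add, List.singleton_append]
  rw [hfd, hBfold, ← hT]
  have hcond : ((if 2 ≤ k-1 then (k-1) % 2 else (k-1)) = 1) ↔ (2 ≤ k ∧ PySem.Int.mod k 2 = 0) := by
    rw [hmod]
    split_ifs with h <;> omega
  by_cases hc : 2 ≤ k ∧ PySem.Int.mod k 2 = 0
  · rw [if_pos (hcond.mpr hc), if_pos hc]
    rfl
  · rw [if_neg (fun h => hc (hcond.mp h)), if_neg hc]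
    rfl

-- ===== VERDICT (by name: the statement is the Claim_ definition above) =====
theorem constructArray_spec : Claim_equal_constructArray := by
  intro n k _ hpre
  exact constructArray_spec_aux n k hpre
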